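-- pv_equiv track=rewrite | github.com/lelong88/nspaceresearch | design-curriculums/original-novels/the-little-bookshop-by-the-sea/validate_content.py | check_property_2
-- ===== SOURCE A (Python) =====
-- def check_property_2(all_vocab_sets):
--     """Property 2: At most 2 vocab words shared between any two chapters."""
--     errors = []
--     for i in range(len(all_vocab_sets)):
--         for j in range(i + 1, len(all_vocab_sets)):
--             overlap = all_vocab_sets[i] & all_vocab_sets[j]
--             if len(overlap) > 2:
--                 errors.append(
--                     f"Chapters {i + 1} & {j + 1}: {len(overlap)} shared words "
--                     f"(max 2 allowed): {sorted(overlap)}"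
--                 )
--     return errors
-- ===== SOURCE B (Python) =====
-- def check_property_2(all_vocab_sets):
--     """Property 2: At most 2 vocab words shared between any two chapters."""
--     # flatten: one (word, chapter) record per occurrence
--     occ = []
--     for i, vocab in enumerate(all_vocab_sets):
--         for w in vocab:
--             occ.append((w, i))
--     # inverted index: word -> increasing list of chapters containing it
--     index = {}
--     for w, i in occ:
--         index.setdefault(w, []).append(i)
--     # one record per (co-occurring chapter pair, shared word)
--     pairs = []
--     for w, chapters in index.items():
--         for a in range(len(chapters)):
--             for b in range(a + 1, len(chapters)):
--                 pairs.append(((chapters[a], chapters[b]), w))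
--     # group the shared words by chapter pair
--     shared = {}
--     for key, w in pairs:
--         shared.setdefault(key, []).append(w)
--     errors = []
--     for i in range(len(all_vocab_sets)):
--         for j in range(i + 1, len(all_vocab_sets)):
--             words = shared.get((i, j), [])
--             if len(words) > 2:
--                 errors.append(
--                     f"Chapters {i + 1} & {j + 1}: {len(words)} shared words "
--                     f"(max 2 allowed): {sorted(words)}"
--                 )
--     return errors
-- ===== Notes on version B (the rewrite author's own statement) =====
-- stated objective: alternative
-- what changed: A intersects every pair of vocab sets; B instead builds an inverted index word->chapters and groups the shared words per co-occurring chapter pair in one pass, so the pair loop only does dictionary lookups; Pre_ only states the set-representation invariant (distinct elements per inner list) required by the type convention for Python sets.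
import Mathlib
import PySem

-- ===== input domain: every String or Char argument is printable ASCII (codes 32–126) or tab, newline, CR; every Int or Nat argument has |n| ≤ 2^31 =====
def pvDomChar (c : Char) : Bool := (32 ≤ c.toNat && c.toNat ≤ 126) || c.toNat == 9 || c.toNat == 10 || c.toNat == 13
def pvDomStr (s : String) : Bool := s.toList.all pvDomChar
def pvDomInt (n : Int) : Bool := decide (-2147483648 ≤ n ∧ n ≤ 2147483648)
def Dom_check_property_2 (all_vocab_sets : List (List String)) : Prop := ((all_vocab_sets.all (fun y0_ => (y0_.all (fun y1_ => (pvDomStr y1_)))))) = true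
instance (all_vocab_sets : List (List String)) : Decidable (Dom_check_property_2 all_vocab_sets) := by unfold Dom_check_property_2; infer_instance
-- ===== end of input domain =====

-- B replaces A's quadratic per-pair set intersections by an inverted index (word → chapters) that
-- groups the shared words per co-occurring chapter pair in one pass; return value only, no mutation.

-- Shared formatting helper: both Pythons build the identical f-string
-- "Chapters {i+1} & {j+1}: {len} shared words (max 2 allowed): {sorted(words)}".
-- Python's repr of a str, hand-ported: exact for strings of printable ASCII plus tab/newline/CR
-- (quote is ' unless the string has ' and no "; backslash, quote, \t, \n, \r are escaped).
def pvReprChars (q : Char) (cs : List Char) : List Char :=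
  cs.flatMap (fun c =>
    if c = '\\' ∨ c = q then ['\\', c]
    else if c = '\t' then ['\\', 't']
    else if c = '\n' then ['\\', 'n']
    else if c = '\r' then ['\\', 'r']
    else [c])

def pvRepr (s : String) : String :=
  let cs := s.toList
  let q : Char := if '\'' ∈ cs ∧ ¬ ('"' ∈ cs) then '"' else '\''
  String.ofList ([q] ++ pvReprChars q cs ++ [q])

def pvMsg (i j : Int) (ws : List String) : String :=
  "Chapters " ++ PySem.Int.toStr (i + 1) ++ " & " ++ PySem.Int.toStr (j + 1) ++ ": " ++
  PySem.Int.toStr (ws.length : Int) ++ " shared words (max 2 allowed): [" ++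
  PySem.Str.join ", " ((PySem.List.sorted ws (fun x => x) false).map pvRepr) ++ "]"

-- ===== PORT A =====
def check_property_2 (all_vocab_sets : List (List String)) : List String :=
  (PySem.List.pyRange 0 (PySem.List.len all_vocab_sets) 1).foldl (fun errors i =>
    (PySem.List.pyRange (i + 1) (PySem.List.len all_vocab_sets) 1).foldl (fun errors j =>
      let overlap : PySem.Set String :=
        PySem.Set.inter (PySem.List.pyGetD all_vocab_sets i []) (PySem.List.pyGetD all_vocab_sets j [])
      if 2 < (overlap.length : Int) then errors ++ [pvMsg i j overlap] else errors)
      errors) []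

-- ===== PORT B =====
-- occ: one (word, chapter) record per occurrence
def pvOcc (xs : List (List String)) : List (String × Int) :=
  (PySem.List.enumerate xs 0).foldl (fun acc iv => iv.2.foldl (fun acc w => acc ++ [(w, iv.1)]) acc) []

-- index: word -> increasing list of chapters containing it (setdefault(w, []).append(i))
def pvIndex (xs : List (List String)) : PySem.Dict String (List Int) :=
  (pvOcc xs).foldl (fun d p => d.modify p.1 [] (· ++ [p.2])) PySem.Dict.empty

-- pairs: one ((chapter pair), word) record per co-occurrence
def pvPairs (xs : List (List String)) : List ((Int × Int) × String) :=
  (pvIndex xs).items.foldl (fun acc wc =>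
    (PySem.List.pyRange 0 (PySem.List.len wc.2) 1).foldl (fun acc a =>
      (PySem.List.pyRange (a + 1) (PySem.List.len wc.2) 1).foldl (fun acc b =>
        acc ++ [((PySem.List.pyGetD wc.2 a 0, PySem.List.pyGetD wc.2 b 0), wc.1)]) acc) acc) []

-- shared: chapter pair -> its shared words (setdefault(key, []).append(w))
def pvShared (xs : List (List String)) : PySem.Dict (Int × Int) (List String) :=
  (pvPairs xs).foldl (fun d p => d.modify p.1 [] (· ++ [p.2])) PySem.Dict.empty

def check_property_2_alt (all_vocab_sets : List (List String)) : List String :=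
  let shared := pvShared all_vocab_sets
  (PySem.List.pyRange 0 (PySem.List.len all_vocab_sets) 1).foldl (fun errors i =>
    (PySem.List.pyRange (i + 1) (PySem.List.len all_vocab_sets) 1).foldl (fun errors j =>
      let words := shared.getD (i, j) []   -- shared.get((i, j), [])
      if 2 < (words.length : Int) then errors ++ [pvMsg i j words] else errors)
      errors) []

-- ===== PRECONDITION & SPEC =====
-- Pre_ states the set-representation invariant of the type convention: each inner list models a
-- Python set, so it holds distinct elements; a list with duplicates represents no Python input.
def Pre_check_property_2 (all_vocab_sets : List (List String)) : Prop :=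
  ∀ v ∈ all_vocab_sets, v.Nodup
instance (all_vocab_sets : List (List String)) : Decidable (Pre_check_property_2 all_vocab_sets) := by
  unfold Pre_check_property_2; infer_instance

def pvWitness_check_property_2 : List (List String) :=
  [["a", "b", "c", "d"], ["b", "c", "a"], ["z", "a"]]

def Spec_check_property_2 (all_vocab_sets : List (List String)) (out : List String) : Prop :=
  out = check_property_2_alt all_vocab_sets
instance (all_vocab_sets : List (List String)) (out : List String) : Decidable (Spec_check_property_2 all_vocab_sets out) := by
  unfold Spec_check_property_2; infer_instance

-- ===== CLAIM (what is proved, stated in full; the proofs are below) =====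
def Claim_equal_check_property_2 : Prop := ∀ (all_vocab_sets : List (List String)), Dom_check_property_2 all_vocab_sets → Pre_check_property_2 all_vocab_sets → Spec_check_property_2 all_vocab_sets (check_property_2 all_vocab_sets)

-- ===== LEMMAS AND PROOFS =====

-- chapters containing w, as a filtered range (the characterisation of pvIndex's values)
def pvChaps (xs : List (List String)) (w : String) : List Int :=
  (PySem.List.pyRange 0 (PySem.List.len xs) 1).filter (fun i => decide (w ∈ PySem.List.pyGetD xs i []))

-- the (a, b)-loop of pvPairs over one chapter list
def pvPairsOf (ch : List Int) : List (Int × Int) :=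
  (PySem.List.pyRange 0 (PySem.List.len ch) 1).flatMap (fun a =>
    (PySem.List.pyRange (a + 1) (PySem.List.len ch) 1).map (fun b =>
      (PySem.List.pyGetD ch a 0, PySem.List.pyGetD ch b 0)))


theorem pv_flatMap_filter {α : Type} (l : List α) (p : α → Bool) :
    (l.flatMap fun x => if p x then [x] else []) = l.filter p := by
  induction l with
  | nil => rfl
  | cons x t ih => by_cases h : p x <;> simp [h, ih]

theorem pvChaps_getD (xs : List (List String)) {i : Int} (h0 : 0 ≤ i)
    (h1 : i < PySem.List.len xs) :
    ∃ hh : i.toNat < xs.length, PySem.List.pyGetD xs i ([] : List String) = xs[i.toNat] := by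
  rw [PySem.List.len_eq] at h1
  exact ⟨by omega, PySem.List.pyGetD_eq_getElem xs [] h0 h1⟩

theorem pvChapsInt_getD (ch : List Int) {a : Int} (h0 : 0 ≤ a)
    (h1 : a < PySem.List.len ch) :
    ∃ hh : a.toNat < ch.length, PySem.List.pyGetD ch a 0 = ch[a.toNat] := by
  rw [PySem.List.len_eq] at h1
  exact ⟨by omega, PySem.List.pyGetD_eq_getElem ch 0 h0 h1⟩

theorem pvStrictMono_inj (ch : List Int) (h : ch.Pairwise (· < ·)) {p q : Nat}
    (hp : p < ch.length) (hq : q < ch.length) (he : ch[p] = ch[q]) : p = q := by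
  rcases lt_trichotomy p q with hc | hc | hc
  · have := List.pairwise_iff_getElem.mp h _ _ hp hq hc; omega
  · exact hc
  · have := List.pairwise_iff_getElem.mp h _ _ hq hp hc; omega

theorem pvOcc_eq (xs : List (List String)) :
    pvOcc xs = (PySem.List.enumerate xs 0).flatMap (fun iv => iv.2.map (fun w => (w, iv.1))) := by
  unfold pvOcc
  rw [PySem.List.foldl_congr_mem _ _ (fun acc iv => acc ++ iv.2.map (fun w => (w, iv.1))) _
    (by intro acc iv _; exact PySem.List.foldl_append_singleton_eq_map _ _ _)]
  simpa using PySem.List.foldl_append_eq_flatMap _ _ ([] : List (String × Int))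

theorem pvIndex_getD (xs : List (List String)) (hnd : ∀ v ∈ xs, v.Nodup) (w : String) :
    (pvIndex xs).getD w [] = pvChaps xs w := by
  unfold pvIndex
  rw [PySem.Dict.getD_foldl_modify_append, PySem.Dict.getD_empty, List.nil_append,
    pvOcc_eq, List.filter_flatMap, List.map_flatMap,
    PySem.List.enumerate_eq_map_pyRange xs [], List.flatMap_map]
  unfold pvChaps
  rw [← pv_flatMap_filter]
  apply List.flatMap_congr
  intro i hi
  rw [PySem.List.mem_pyRange_one] at hi
  obtain ⟨hlt, hget⟩ := pvChaps_getD xs hi.1 hi.2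
  have hv : (PySem.List.pyGetD xs i ([] : List String)).Nodup := by
    rw [hget]; exact hnd _ (List.getElem_mem hlt)
  rw [List.filter_map, List.map_map]
  have : ((fun p => p.1 == w) ∘ fun w' => ((w', i) : String × Int)) = fun w' => w' == w := rfl
  rw [this, List.filter_beq]
  by_cases hw : w ∈ PySem.List.pyGetD xs i ([] : List String)
  · rw [List.count_eq_one_of_mem hv hw]
    simp [hw]
  · rw [List.count_eq_zero.mpr hw]
    simp [hw]

theorem pvIndex_keys (xs : List (List String)) :
    (pvIndex xs).keys = PySem.Set.ofList ((pvOcc xs).map (·.1)) := by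
  have h := PySem.Dict.keys_foldl_modify_key (pvOcc xs) (fun p => p.1) ([] : List Int)
    (fun _ p => (· ++ [p.2])) PySem.Dict.empty
  simpa [pvIndex, PySem.Dict.keys_empty, PySem.Set.update_empty] using h

theorem pvChaps_pairwise (xs : List (List String)) (w : String) :
    (pvChaps xs w).Pairwise (· < ·) := by
  exact (PySem.List.pairwise_lt_pyRange_one 0 (PySem.List.len xs)).filter _

theorem mem_pvChaps (xs : List (List String)) (w : String) (i : Int) :
    i ∈ pvChaps xs w ↔ 0 ≤ i ∧ i < PySem.List.len xs ∧ w ∈ PySem.List.pyGetD xs i [] := by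
  simp [pvChaps, List.mem_filter, PySem.List.mem_pyRange_one, and_assoc]

theorem mem_pvPairsOf (ch : List Int) (h : ch.Pairwise (· < ·)) (p : Int × Int) :
    p ∈ pvPairsOf ch ↔ p.1 ∈ ch ∧ p.2 ∈ ch ∧ p.1 < p.2 := by
  obtain ⟨x, y⟩ := p
  simp only [pvPairsOf, List.mem_flatMap, List.mem_map, PySem.List.mem_pyRange_one]
  constructor
  · rintro ⟨a, ⟨ha0, haL⟩, b, ⟨hab, hbL⟩, heq⟩
    obtain ⟨haL', hga⟩ := pvChapsInt_getD ch ha0 haL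
    obtain ⟨hbL', hgb⟩ := pvChapsInt_getD ch (by omega) hbL
    obtain ⟨hx, hy⟩ := Prod.mk.injEq .. ▸ heq
    subst hx hy
    rw [hga, hgb]
    refine ⟨List.getElem_mem _, List.getElem_mem _, ?_⟩
    exact List.pairwise_iff_getElem.mp h _ _ haL' hbL' (by omega)
  · rintro ⟨hx, hy, hlt⟩
    obtain ⟨ka, hka, hax⟩ := List.mem_iff_getElem.mp hx
    obtain ⟨kb, hkb, hby⟩ := List.mem_iff_getElem.mp hy
    have hkab : ka < kb := by
      rcases lt_trichotomy ka kb with hc | hc | hc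
      · exact hc
      · subst hc; rw [hax] at hby; omega
      · have := List.pairwise_iff_getElem.mp h _ _ hkb hka hc
        rw [hax, hby] at this; omega
    refine ⟨(ka : Int), ⟨by omega, by rw [PySem.List.len_eq]; exact_mod_cast hka⟩,
      (kb : Int), ⟨by exact_mod_cast hkab, by rw [PySem.List.len_eq]; exact_mod_cast hkb⟩, ?_⟩
    rw [PySem.List.pyGetD_eq_getElem ch 0 (by omega) (by exact_mod_cast hka),
      PySem.List.pyGetD_eq_getElem ch 0 (by omega) (by exact_mod_cast hkb)]
    simp [hax, hby]

theorem nodup_pvPairsOf (ch : List Int) (h : ch.Pairwise (· < ·)) : (pvPairsOf ch).Nodup := by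
  unfold pvPairsOf
  rw [List.nodup_flatMap]
  constructor
  · intro a ha
    rw [PySem.List.mem_pyRange_one] at ha
    refine List.Nodup.map_on ?_ (PySem.List.nodup_pyRange_one _ _)
    intro b hb b' hb' heq
    rw [PySem.List.mem_pyRange_one] at hb hb'
    obtain ⟨hbL, hgb⟩ := pvChapsInt_getD ch (by omega) hb.2
    obtain ⟨hbL', hgb'⟩ := pvChapsInt_getD ch (by omega) hb'.2
    have h2 := congrArg Prod.snd heq
    simp only [hgb, hgb'] at h2
    have := pvStrictMono_inj ch h hbL hbL' h2
    omega
  · refine List.Pairwise.imp_of_mem ?_ (PySem.List.pairwise_lt_pyRange_one 0 (PySem.List.len ch))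
    intro a a' hma hma' hlt
    rw [PySem.List.mem_pyRange_one] at hma hma'
    intro q hq hq'
    rw [List.mem_map] at hq hq'
    obtain ⟨b, hb, hqe⟩ := hq
    obtain ⟨b', hb', hqe'⟩ := hq'
    obtain ⟨haL, hga⟩ := pvChapsInt_getD ch hma.1 hma.2
    obtain ⟨haL', hga'⟩ := pvChapsInt_getD ch hma'.1 hma'.2
    have h1 := congrArg Prod.fst hqe
    have h1' := congrArg Prod.fst hqe'
    simp only [← h1, hga, hga'] at h1'
    have := pvStrictMono_inj ch h haL' haL h1'
    omega

theorem pvPairs_eq (xs : List (List String)) :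
    pvPairs xs = (pvIndex xs).items.flatMap (fun wc => (pvPairsOf wc.2).map (fun p => (p, wc.1))) := by
  unfold pvPairs
  rw [PySem.List.foldl_congr_mem _ _
    (fun (acc : List ((Int × Int) × String)) (wc : String × List Int) =>
      acc ++ (pvPairsOf wc.2).map (fun p => (p, wc.1))) _ ?_]
  · simpa using PySem.List.foldl_append_eq_flatMap
      (fun (wc : String × List Int) => (pvPairsOf wc.2).map (fun p => (p, wc.1))) _
      ([] : List ((Int × Int) × String))
  · intro acc wc _
    rw [PySem.List.foldl_congr_mem _ _
      (fun (acc : List ((Int × Int) × String)) (a : Int) =>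
        acc ++ ((PySem.List.pyRange (a + 1) (PySem.List.len wc.2) 1).map (fun b =>
          ((PySem.List.pyGetD wc.2 a 0, PySem.List.pyGetD wc.2 b 0), wc.1)))) _
      (by intro acc a _; exact PySem.List.foldl_append_singleton_eq_map _ _ _)]
    rw [PySem.List.foldl_append_eq_flatMap]
    show _ = acc ++ (pvPairsOf wc.2).map (fun p => (p, wc.1))
    unfold pvPairsOf
    simp [List.map_flatMap, List.map_map, Function.comp_def]

theorem pvShared_getD (xs : List (List String)) (hnd : ∀ v ∈ xs, v.Nodup) (c : Int × Int) :
    (pvShared xs).getD c [] =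
      (pvIndex xs).keys.filter (fun w => decide (c ∈ pvPairsOf (pvChaps xs w))) := by
  have hkeys : (pvIndex xs).keys.Nodup := by
    rw [pvIndex_keys]; exact PySem.Set.nodup_ofList _
  unfold pvShared
  rw [PySem.Dict.getD_foldl_modify_append, PySem.Dict.getD_empty, List.nil_append,
    pvPairs_eq, List.filter_flatMap, List.map_flatMap,
    PySem.Dict.items_eq_map_keys _ hkeys [], List.flatMap_map]
  rw [← pv_flatMap_filter]
  apply List.flatMap_congr
  intro w hw
  rw [pvIndex_getD xs hnd w]
  rw [List.filter_map, List.map_map]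
  have : ((fun p => p.1 == c) ∘ fun p => ((p, w) : (Int × Int) × String)) = fun p => p == c := rfl
  rw [this, List.filter_beq]
  by_cases hc : c ∈ pvPairsOf (pvChaps xs w)
  · rw [List.count_eq_one_of_mem (nodup_pvPairsOf _ (pvChaps_pairwise xs w)) hc]
    simp [hc]
  · rw [List.count_eq_zero.mpr hc]
    simp [hc]

theorem pvShared_perm (xs : List (List String)) (hnd : ∀ v ∈ xs, v.Nodup) (i j : Int)
    (hi : 0 ≤ i) (hij : i < j) (hj : j < PySem.List.len xs) :
    ((pvShared xs).getD (i, j) []).Perm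
      (PySem.Set.inter (PySem.List.pyGetD xs i []) (PySem.List.pyGetD xs j [])) := by
  rw [pvShared_getD xs hnd]
  have hkeys : (pvIndex xs).keys.Nodup := by
    rw [pvIndex_keys]; exact PySem.Set.nodup_ofList _
  obtain ⟨hiL, hgi⟩ := pvChaps_getD xs hi (by omega)
  obtain ⟨hjL, hgj⟩ := pvChaps_getD xs (by omega) hj
  have hndi : (PySem.List.pyGetD xs i ([] : List String)).Nodup := by
    rw [hgi]; exact hnd _ (List.getElem_mem hiL)
  rw [List.perm_ext_iff_of_nodup (hkeys.filter _) ?_]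
  · intro w
    rw [List.mem_filter, PySem.Set.mem_inter]
    simp only [decide_eq_true_eq]
    rw [mem_pvPairsOf _ (pvChaps_pairwise xs w), mem_pvChaps, mem_pvChaps]
    constructor
    · rintro ⟨-, ⟨-, -, hwi⟩, ⟨-, -, hwj⟩, -⟩
      exact ⟨hwi, hwj⟩
    · rintro ⟨hwi, hwj⟩
      refine ⟨?_, ⟨hi, by omega, hwi⟩, ⟨by omega, hj, hwj⟩, hij⟩
      rw [pvIndex_keys, PySem.Set.mem_ofList, pvOcc_eq, List.map_flatMap, List.mem_flatMap]
      refine ⟨(i, PySem.List.pyGetD xs i []), ?_, ?_⟩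
      · rw [PySem.List.mem_enumerate_iff]
        exact ⟨i.toNat, hiL, by rw [hgi]; congr 1; omega⟩
      · simpa using hwi
  · exact List.Nodup.filter _ hndi

theorem pvMsg_congr (i j : Int) (ws vs : List String) (h : ws.Perm vs) :
    pvMsg i j ws = pvMsg i j vs := by
  unfold pvMsg
  rw [h.length_eq, PySem.List.sorted_eq_sorted_of_perm ws vs (fun x => x) (fun _ _ hh => hh) h]

-- ===== VERDICT (by name: the statement is the Claim_ definition above) =====
theorem check_property_2_spec : Claim_equal_check_property_2 := by
  intro xs _hdom hnd
  unfold Spec_check_property_2 check_property_2 check_property_2_alt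
  refine PySem.List.foldl_congr_mem _ _ _ _ ?_
  intro acc i hi
  refine PySem.List.foldl_congr_mem _ _ _ _ ?_
  intro acc j hj
  rw [PySem.List.mem_pyRange_one] at hi hj
  have hperm := pvShared_perm xs hnd i j hi.1 (by omega) hj.2
  have hlen := hperm.length_eq
  simp only [hlen, pvMsg_congr i j _ _ hperm]
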